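-- pv_equiv track=rewrite | github.com/lagillenwater/multi-dwpc | scripts/extract_top_paths_local.py | parse_metapath
-- ===== SOURCE A (Python) =====
-- from typing import Dict, List, Tuple
--
-- def parse_metapath(metapath: str) -> Tuple[List[str], List[str]]:
--     node_abbrevs = ["BP", "CC", "MF", "PW", "SE", "PC", "G", "A", "D", "C", "S"]
--     node_abbrevs = sorted(node_abbrevs, key=len, reverse=True)
--     nodes: List[str] = []
--     edges: List[str] = []
--     i = 0
--     edge_token = ""
--     while i < len(metapath):
--         matched = False
--         for ab in node_abbrevs:
--             if metapath.startswith(ab, i):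
--                 if nodes:
--                     edges.append(edge_token)
--                     edge_token = ""
--                 nodes.append(ab)
--                 i += len(ab)
--                 matched = True
--                 break
--         if not matched:
--             edge_token += metapath[i]
--             i += 1
--     return nodes, edges
-- ===== SOURCE B (Python) =====
-- from typing import List, Tuple
--
-- def parse_metapath(metapath: str) -> Tuple[List[str], List[str]]:
--     # One scan records the (start, end) span of every greedy node match
--     # (longest abbreviations tried first); nodes and edges are then cut out of
--     # the string by slicing: each edge is the text between consecutive spans,
--     # with any unmatched leading text belonging to the first edge segment.
--     abbrevs = ("BP", "CC", "MF", "PW", "SE", "PC", "G", "A", "D", "C", "S")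
--     spans: List[Tuple[int, int]] = []
--     i, n = 0, len(metapath)
--     while i < n:
--         ab = next((a for a in abbrevs if metapath.startswith(a, i)), None)
--         if ab is None:
--             i += 1
--         else:
--             spans.append((i, i + len(ab)))
--             i += len(ab)
--     nodes = [metapath[s:e] for s, e in spans]
--     edges = [metapath[e:s2] for (_, e), (s2, _) in zip(spans, spans[1:])]
--     if edges:
--         edges[0] = metapath[: spans[0][0]] + edges[0]
--     return nodes, edges
-- ===== Notes on version B (the rewrite author's own statement) =====
-- stated objective: alternative
-- what changed: A maintains a running edge-token accumulator and nodes/edges lists inside one state machine; B does a single scan that only records the (start, end) spans of the greedy node matches and then builds nodes and edges by slicing the string between consecutive spans (leading unmatched text going with the first edge segment).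
import Mathlib
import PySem

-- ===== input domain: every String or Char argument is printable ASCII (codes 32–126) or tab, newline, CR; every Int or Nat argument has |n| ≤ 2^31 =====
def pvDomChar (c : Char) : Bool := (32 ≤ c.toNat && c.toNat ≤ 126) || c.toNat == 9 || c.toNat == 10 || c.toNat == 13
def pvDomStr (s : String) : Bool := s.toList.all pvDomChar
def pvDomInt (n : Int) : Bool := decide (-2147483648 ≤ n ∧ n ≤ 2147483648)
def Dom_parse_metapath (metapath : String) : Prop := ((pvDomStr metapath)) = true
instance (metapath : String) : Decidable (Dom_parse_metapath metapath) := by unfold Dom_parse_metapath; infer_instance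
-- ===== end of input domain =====

-- B replaces A's running edge-token state machine by a single scan that records match spans,
-- after which nodes and edges are cut out of the string by slicing (objective: alternative).

-- ===== PORT A =====
-- the node_abbrevs literal of A
def pvNodeAbbrevs : List (List Char) := [['B','P'],['C','C'],['M','F'],['P','W'],['S','E'],['P','C'],['G'],['A'],['D'],['C'],['S']]
-- node_abbrevs = sorted(node_abbrevs, key=len, reverse=True)
def pvSortedAbbrevs : List (List Char) := PySem.List.sorted pvNodeAbbrevs (fun a => a.length) true

-- A's inner 'for ab in node_abbrevs: if metapath.startswith(ab, i): … break':
-- working on rest = metapath.toList.drop i, startswith(ab, i) is exactly ab.isPrefixOf rest.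
def aFindAbbrev : List (List Char) → List Char → Option (List Char)
  | [], _ => none
  | ab :: abs, rest => if ab.isPrefixOf rest then some ab else aFindAbbrev abs rest

-- termination helper for A's while loop: a matched abbreviation is nonempty
theorem aFindAbbrev_mem {abs : List (List Char)} {rest ab : List Char}
    (h : aFindAbbrev abs rest = some ab) : ab ∈ abs := by
  induction abs with
  | nil => simp [aFindAbbrev] at h
  | cons a t ih =>
    simp only [aFindAbbrev] at h
    split at h
    · simp_all
    · exact List.mem_cons_of_mem _ (ih h)

theorem aFindAbbrev_pos {rest ab : List Char}
    (h : aFindAbbrev pvSortedAbbrevs rest = some ab) : 0 < ab.length := by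
  have hm := aFindAbbrev_mem h
  have : pvSortedAbbrevs = pvNodeAbbrevs := by decide
  rw [this] at hm
  fin_cases hm <;> decide

-- A's while loop; state (nodes, edges, edge_token) carried as List Char lists,
-- converted to String once at the end (Python builds the same strings).
def aLoop : List Char → List (List Char) → List (List Char) → List Char →
    List (List Char) × List (List Char)
  | [], nodes, edges, _ => (nodes, edges)
  | c :: cs, nodes, edges, tok =>
    match h : aFindAbbrev pvSortedAbbrevs (c :: cs) with
    | some ab =>
        aLoop ((c :: cs).drop ab.length) (nodes ++ [ab])
          (if nodes.isEmpty then edges else edges ++ [tok])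
          (if nodes.isEmpty then tok else [])
    | none => aLoop cs nodes edges (tok ++ [c])
  termination_by rest _ _ _ => rest.length
  decreasing_by
    · have := aFindAbbrev_pos h
      simp [List.length_drop]; omega
    · simp

def parse_metapath (metapath : String) : List String × List String :=
  let r := aLoop metapath.toList [] [] []
  (r.1.map String.ofList, r.2.map String.ofList)

-- ===== PORT B =====
-- the abbrevs tuple of B (written longest-first, as in Source B)
def pvAbbrevsB : List (List Char) := [['B','P'],['C','C'],['M','F'],['P','W'],['S','E'],['P','C'],['G'],['A'],['D'],['C'],['S']]

-- termination helper for B's scan: a matched abbreviation is nonempty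
theorem find?_abbrevsB_pos {rest ab : List Char}
    (h : List.find? (fun a => a.isPrefixOf rest) pvAbbrevsB = some ab) : 0 < ab.length := by
  have hm := List.mem_of_find?_eq_some h
  fin_cases hm <;> decide

-- B's scan: 'ab = next((a for a in abbrevs if metapath.startswith(a, i)), None)' is
-- List.find? on rest = metapath.toList.drop i; it records the (i, i + len(ab)) spans.
def bSpans : List Char → Nat → List (Nat × Nat)
  | [], _ => []
  | c :: cs, i =>
    match h : List.find? (fun a => a.isPrefixOf (c :: cs)) pvAbbrevsB with
    | some ab => (i, i + ab.length) :: bSpans ((c :: cs).drop ab.length) (i + ab.length)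
    | none => bSpans cs (i + 1)
  termination_by rest _ => rest.length
  decreasing_by
    · have := find?_abbrevsB_pos h
      simp [List.length_drop]; omega
    · simp

def parse_metapath_alt (metapath : String) : List String × List String :=
  let cs := metapath.toList
  let spans := bSpans cs 0
  -- metapath[s:e] / metapath[:s] ported as PySem.List.slice on the character list
  let nodes := spans.map (fun p => PySem.List.slice cs (some (p.1 : Int)) (some (p.2 : Int)))
  let gaps := (spans.zip spans.tail).map
    (fun q => PySem.List.slice cs (some (q.1.2 : Int)) (some (q.2.1 : Int)))
  let edges :=
    match gaps, spans with
    | g :: t, p0 :: _ => (PySem.List.slice cs none (some (p0.1 : Int)) ++ g) :: t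
    | _, _ => gaps
  (nodes.map String.ofList, edges.map String.ofList)

-- ===== PRECONDITION & SPEC =====
def Spec_parse_metapath (metapath : String) (out : List String × List String) : Prop := out = parse_metapath_alt metapath
instance (metapath : String) (out : List String × List String) : Decidable (Spec_parse_metapath metapath out) := by unfold Spec_parse_metapath; infer_instance

-- ===== CLAIM (what is proved, stated in full; the proofs are below) =====
def Claim_equal_parse_metapath : Prop := ∀ (metapath : String), Dom_parse_metapath metapath → Spec_parse_metapath metapath (parse_metapath metapath)

-- ===== LEMMAS AND PROOFS =====

-- reference tokenization: (pending text before the first node, nodes, gaps between consecutive nodes)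
def pScan : List Char → List Char × List (List Char) × List (List Char)
  | [] => ([], [], [])
  | c :: cs =>
    match h : aFindAbbrev pvSortedAbbrevs (c :: cs) with
    | some ab =>
        let r := pScan ((c :: cs).drop ab.length)
        ([], ab :: r.2.1, if r.2.1.isEmpty then r.2.2 else r.1 :: r.2.2)
    | none =>
        let r := pScan cs
        (c :: r.1, r.2.1, r.2.2)
  termination_by rest => rest.length
  decreasing_by
    · have := aFindAbbrev_pos h
      simp [List.length_drop]; omega
    · simp

theorem pScan_some {c : Char} {cs ab : List Char}
    (h : aFindAbbrev pvSortedAbbrevs (c :: cs) = some ab) :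
    pScan (c :: cs) =
      ([], ab :: (pScan ((c :: cs).drop ab.length)).2.1,
        if (pScan ((c :: cs).drop ab.length)).2.1.isEmpty then (pScan ((c :: cs).drop ab.length)).2.2
        else (pScan ((c :: cs).drop ab.length)).1 :: (pScan ((c :: cs).drop ab.length)).2.2) := by
  rw [pScan]
  split <;> simp_all

theorem pScan_none {c : Char} {cs : List Char}
    (h : aFindAbbrev pvSortedAbbrevs (c :: cs) = none) :
    pScan (c :: cs) = (c :: (pScan cs).1, (pScan cs).2.1, (pScan cs).2.2) := by
  rw [pScan]
  split <;> simp_all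

theorem pScan_nodes_nil : ∀ rest : List Char, (pScan rest).2.1 = [] → (pScan rest).2.2 = [] := by
  intro rest
  induction rest using pScan.induct with
  | case1 => simp [pScan]
  | case2 c cs ab h ih => rw [pScan_some h]; simp
  | case3 c cs h ih => rw [pScan_none h]; exact ih

theorem aLoop_some {c : Char} {cs ab : List Char} (nodes edges : List (List Char)) (tok : List Char)
    (h : aFindAbbrev pvSortedAbbrevs (c :: cs) = some ab) :
    aLoop (c :: cs) nodes edges tok =
      aLoop ((c :: cs).drop ab.length) (nodes ++ [ab])
        (if nodes.isEmpty then edges else edges ++ [tok])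
        (if nodes.isEmpty then tok else []) := by
  rw [aLoop]
  split <;> simp_all

theorem aLoop_none {c : Char} {cs : List Char} (nodes edges : List (List Char)) (tok : List Char)
    (h : aFindAbbrev pvSortedAbbrevs (c :: cs) = none) :
    aLoop (c :: cs) nodes edges tok = aLoop cs nodes edges (tok ++ [c]) := by
  rw [aLoop]
  split <;> simp_all

def mergeHead (x : List Char) : List (List Char) → List (List Char)
  | [] => []
  | e :: t => (x ++ e) :: t

-- A's loop, characterized by the reference tokenization
theorem aLoop_eq_pScan (rest : List Char) : ∀ nodes edges tok,
    aLoop rest nodes edges tok =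
      (nodes ++ (pScan rest).2.1,
       match (pScan rest).2.1 with
       | [] => edges
       | _ :: _ =>
         if nodes.isEmpty then edges ++ mergeHead (tok ++ (pScan rest).1) (pScan rest).2.2
         else edges ++ (tok ++ (pScan rest).1) :: (pScan rest).2.2) := by
  induction rest using pScan.induct with
  | case1 => intro nodes edges tok; simp [aLoop, pScan]
  | case2 c cs ab h ih =>
    intro nodes edges tok
    rw [aLoop_some nodes edges tok h, ih, pScan_some h]
    have hnil := pScan_nodes_nil ((c :: cs).drop ab.length)
    rcases hns : (pScan ((c :: cs).drop ab.length)).2.1 with _ | ⟨x, t⟩ <;>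
      by_cases hn : nodes.isEmpty <;>
        simp_all [mergeHead, List.isEmpty_iff]
  | case3 c cs h ih =>
    intro nodes edges tok
    rw [aLoop_none nodes edges tok h, ih, pScan_none h]
    rcases hns : (pScan cs).2.1 with _ | ⟨x, t⟩ <;>
      by_cases hn : nodes.isEmpty <;> simp_all [mergeHead]

-- the two greedy matchers agree (same abbreviations in the same order)
theorem find?_eq_aFind : ∀ rest : List Char,
    List.find? (fun a => a.isPrefixOf rest) pvAbbrevsB = aFindAbbrev pvSortedAbbrevs rest := by
  intro rest
  have hs : pvSortedAbbrevs = pvAbbrevsB := by decide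
  rw [hs]
  have : ∀ abs : List (List Char),
      List.find? (fun a => a.isPrefixOf rest) abs = aFindAbbrev abs rest := by
    intro abs
    induction abs with
    | nil => simp [aFindAbbrev]
    | cons a t ih =>
      simp only [List.find?, aFindAbbrev]
      by_cases hp : a.isPrefixOf rest <;> simp [hp, ih]
  exact this pvAbbrevsB

theorem bSpans_some {c : Char} {cs ab : List Char} (i : Nat)
    (h : List.find? (fun a => a.isPrefixOf (c :: cs)) pvAbbrevsB = some ab) :
    bSpans (c :: cs) i = (i, i + ab.length) :: bSpans ((c :: cs).drop ab.length) (i + ab.length) := by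
  rw [bSpans]
  split <;> simp_all

theorem bSpans_none {c : Char} {cs : List Char} (i : Nat)
    (h : List.find? (fun a => a.isPrefixOf (c :: cs)) pvAbbrevsB = none) :
    bSpans (c :: cs) i = bSpans cs (i + 1) := by
  rw [bSpans]
  split <;> simp_all

-- B's spans, sliced out of the full string, are the reference tokenization
theorem bSpans_spec : ∀ (rest : List Char) (i : Nat), ∀ full : List Char, full.drop i = rest →
    ((bSpans rest i).map (fun p => (full.drop p.1).take (p.2 - p.1)) = (pScan rest).2.1) ∧
    (((bSpans rest i).zip (bSpans rest i).tail).map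
        (fun q => (full.drop q.1.2).take (q.2.1 - q.1.2)) = (pScan rest).2.2) ∧
    (∀ p0 ∈ ((bSpans rest i).head?), i ≤ p0.1 ∧ (full.drop i).take (p0.1 - i) = (pScan rest).1) := by
  intro rest i
  induction rest, i using bSpans.induct with
  | case1 i =>
    intro full hfull
    simp [bSpans, pScan]
  | case2 c cs i ab h ih =>
    intro full hfull
    have hfind : aFindAbbrev pvSortedAbbrevs (c :: cs) = some ab := by
      rw [← find?_eq_aFind]; exact h
    have hpre : ab <+: (c :: cs) := by
      have := List.find?_some h
      simpa [List.isPrefixOf_iff_prefix] using this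
    have hdrop : full.drop (i + ab.length) = (c :: cs).drop ab.length := by
      rw [← hfull, List.drop_drop]
    obtain ⟨ih1, ih2, ih3⟩ := ih full hdrop
    rw [bSpans_some i h, pScan_some hfind]
    refine ⟨?_, ?_, ?_⟩
    · simp only [List.map_cons, ih1]
      congr 1
      rw [hfull]
      have : (c :: cs).take ab.length = ab := (List.prefix_iff_eq_take.mp hpre).symm
      simpa using this
    · rcases hsp : bSpans ((c :: cs).drop ab.length) (i + ab.length) with _ | ⟨y0, sp'⟩
      · have hns : (pScan ((c :: cs).drop ab.length)).2.1 = [] := by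
          rw [← ih1, hsp]; simp
        have hes := pScan_nodes_nil _ hns
        simp [hns, hes]
      · have hns : (pScan ((c :: cs).drop ab.length)).2.1 ≠ [] := by
          rw [← ih1, hsp]; simp
        obtain ⟨hy1, hy2⟩ := ih3 y0 (by rw [hsp]; rfl)
        rw [hsp] at ih2
        simp [List.zip_cons_cons, List.tail_cons, List.isEmpty_iff, hns, List.cons.injEq]
        exact ⟨hy2, by simpa using ih2⟩
    · intro p0 hp0
      simp at hp0
      subst hp0
      simp
  | case3 c cs i h ih =>
    intro full hfull
    have hfind : aFindAbbrev pvSortedAbbrevs (c :: cs) = none := by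
      rw [← find?_eq_aFind]; exact h
    have hdrop : full.drop (i + 1) = cs := by
      have h2 := congrArg List.tail hfull
      simpa [List.tail_drop] using h2
    obtain ⟨ih1, ih2, ih3⟩ := ih full hdrop
    rw [bSpans_none i h, pScan_none hfind]
    refine ⟨ih1, ih2, ?_⟩
    intro p0 hp0
    obtain ⟨hy1, hy2⟩ := ih3 p0 hp0
    refine ⟨by omega, ?_⟩
    rw [hfull]
    have htake : (c :: cs).take (p0.1 - i) = c :: cs.take (p0.1 - i - 1) := by
      rcases hk : p0.1 - i with _ | k
      · omega
      · simp
    rw [htake]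
    have heq : p0.1 - i - 1 = p0.1 - (i + 1) := by omega
    rw [hdrop] at hy2
    rw [heq, hy2]

theorem final_core (m : String) : parse_metapath m = parse_metapath_alt m := by
  obtain ⟨h1, h2, h3⟩ := bSpans_spec m.toList 0 m.toList (by simp)
  simp only [parse_metapath, parse_metapath_alt, PySem.List.slice_natCast,
    PySem.List.slice_to_natCast, aLoop_eq_pScan, List.nil_append, List.isEmpty_nil]
  rw [h1, h2]
  rcases hsp : bSpans m.toList 0 with _ | ⟨x0, sp'⟩
  · rw [hsp] at h1
    have hns : (pScan m.toList).2.1 = [] := by rw [← h1]; simp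
    have hes := pScan_nodes_nil _ hns
    simp [hns, hes]
  · rw [hsp] at h1 h2 h3
    have hns : (pScan m.toList).2.1 ≠ [] := by rw [← h1]; simp
    obtain ⟨hx1, hx2⟩ := h3 x0 (by rfl)
    rcases hes : (pScan m.toList).2.2 with _ | ⟨g, t⟩
    · rcases hn : (pScan m.toList).2.1 with _ | ⟨n0, nt⟩
      · exact absurd hn hns
      · simp [mergeHead]
    · rcases hn : (pScan m.toList).2.1 with _ | ⟨n0, nt⟩
      · exact absurd hn hns
      · simp only [mergeHead]
        have : m.toList.take x0.1 = (pScan m.toList).1 := by simpa using hx2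
        rw [this]
        simp

-- ===== VERDICT (by name: the statement is the Claim_ definition above) =====
theorem parse_metapath_spec : Claim_equal_parse_metapath := by
  intro metapath _
  show parse_metapath metapath = parse_metapath_alt metapath
  exact final_core metapath
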